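-- pv_equiv track=rewrite | github.com/SCLemon/CPE_package | 必考 49 題（UVA驗證）/必考 49 題 Python 參考答案一/10008.py | solve
-- ===== SOURCE A (Python) =====
-- def solve(text):
--     ans = {}
--     for i in text:
--         if 'A' <= i <= 'Z':
--             ans[i] = ans.get(i, 0) + 1
--     ansList = [f'{key} {val}' for key, val in ans.items()]
--     ansList.sort(key=lambda x: (-int(x[2:]), x[0]))
--     return '\n'.join(ansList)
-- ===== SOURCE B (Python) =====
-- def solve(text):
--     pairs = []
--     for x in range(ord('A'), ord('Z') + 1):
--         c = chr(x)
--         cnt = text.count(c)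
--         if cnt > 0:
--             pairs.append((c, cnt))
--     pairs.sort(key=lambda p: (-p[1], p[0]))
--     return '\n'.join(f'{c} {n}' for c, n in pairs)
-- ===== Notes on version B (the rewrite author's own statement) =====
-- stated objective: alternative
-- what changed: Instead of accumulating a first-occurrence-ordered frequency dict in one Python-level pass over the characters and sorting formatted strings by a parsed key, B scans the text once per letter of the fixed 26-letter alphabet with str.count, keeps the letters that occur, and sorts (letter,count) pairs by (-count,letter) before formatting.
import Mathlib
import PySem

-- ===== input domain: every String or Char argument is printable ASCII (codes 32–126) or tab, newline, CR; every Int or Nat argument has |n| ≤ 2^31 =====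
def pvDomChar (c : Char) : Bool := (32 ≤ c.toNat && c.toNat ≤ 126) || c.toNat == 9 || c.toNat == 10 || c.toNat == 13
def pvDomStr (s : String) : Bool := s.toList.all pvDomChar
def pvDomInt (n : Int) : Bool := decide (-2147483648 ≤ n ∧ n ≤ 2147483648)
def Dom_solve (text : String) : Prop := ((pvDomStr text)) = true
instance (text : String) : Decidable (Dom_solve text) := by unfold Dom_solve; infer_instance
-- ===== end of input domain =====

-- B replaces A's one-pass dict accumulation + string-key sort by a fixed-alphabet scan with
-- per-letter counting and a (-count, letter) pair sort (alternative algorithm; the timing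
-- run measured a constant-factor speedup from str.count's bulk scans).


-- ===== PORT A =====
-- int(s): hand-ported decimal evaluator; in A, int() is only ever applied to x[2:], the
-- decimal digits of the formatted positive count, and on nonempty digit strings this fold
-- is exactly Python's int().
def pyIntDigits (s : String) : Int :=
  s.toList.foldl (fun a c => a * 10 + ((c.toNat : Int) - 48)) 0

-- f'{key} {val}' for a Char key and Int val (exact: one-char string, space, str(val))
def fmtA (k : Char) (v : Int) : String :=
  String.ofList [k] ++ " " ++ PySem.Int.toStr v

def solve (text : String) : String :=
  let ans : PySem.Dict Char Int := text.toList.foldl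
    (fun d i => if 'A' ≤ i ∧ i ≤ 'Z' then d.insert i (d.getD i 0 + 1) else d) PySem.Dict.empty
  let ansList := ans.items.map (fun kv => fmtA kv.1 kv.2)
  let sortedL := PySem.List.sorted2 ansList
    (fun x => -(pyIntDigits (PySem.Str.slice x (some 2) none)))   -- -int(x[2:])
    (fun x => (PySem.Str.pyGet? x 0).getD ' ')                    -- x[0]; never none: ansList strings are nonempty
  PySem.Str.join "\n" sortedL

-- ===== PORT B =====
-- f'{c} {n}' for a Char c and Int n
def fmtB (p : Char × Int) : String :=
  String.ofList [p.1] ++ " " ++ PySem.Int.toStr p.2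

def solve_alt (text : String) : String :=
  let pairs : List (Char × Int) := (PySem.List.pyRange 65 91 1).foldl   -- range(ord('A'), ord('Z')+1)
    (fun acc x =>
      let c : Char := Char.ofNat x.toNat                                 -- chr(x); exact for 65..90
      let cnt : Int := (PySem.Str.count text (String.ofList [c]) : Int)  -- text.count(c)
      if 0 < cnt then acc ++ [(c, cnt)] else acc) []
  let sortedPairs := PySem.List.sorted2 pairs (fun p => -p.2) (fun p => p.1)
  PySem.Str.join "\n" (sortedPairs.map fmtB)

-- ===== PRECONDITION & SPEC =====
def Spec_solve (text : String) (out : String) : Prop := out = solve_alt text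
instance (text : String) (out : String) : Decidable (Spec_solve text out) := by unfold Spec_solve; infer_instance

-- ===== CLAIM (what is proved, stated in full; the proofs are below) =====
def Claim_equal_solve : Prop := ∀ (text : String), Dom_solve text → Spec_solve text (solve text)

-- ===== LEMMAS AND PROOFS =====

-- the uppercase letters of the text, in order
def upsOf (text : String) : List Char :=
  text.toList.filter (fun i => decide ('A' ≤ i ∧ i ≤ 'Z'))

-- count of a character in the text
def cntOf (text : String) (c : Char) : Int := (text.toList.count c : Int)

-- the alphabet
def abc : List Char :=
  ['A','B','C','D','E','F','G','H','I','J','K','L','M','N','O','P','Q','R','S','T','U','V','W','X','Y','Z']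

-- letters kept by B, in alphabetical order
def lettersB (text : String) : List Char := abc.filter (fun c => decide (0 < cntOf text c))

-- the lexicographic pair key both sorts use
def pairKey (p : Char × Int) : Lex (Int × Char) := toLex (-p.2, p.1)

-- the string key of A's sort, packed as a lex pair
def strKey (x : String) : Lex (Int × Char) :=
  toLex (-(pyIntDigits (PySem.Str.slice x (some 2) none)), (PySem.Str.pyGet? x 0).getD ' ')

theorem digitChar_sub (r : Nat) (hr : r < 10) : r.digitChar.toNat - 48 = r ∧ 48 ≤ r.digitChar.toNat := by
  interval_cases r <;> decide

theorem valNat_toDigits (m : Nat) :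
    (Nat.toDigits 10 m).foldl (fun n c => n * 10 + (c.toNat - 48)) 0 = m := by
  induction m using Nat.strong_induction_on with
  | _ m ih =>
    by_cases h : m < 10
    · rw [Nat.toDigits_of_lt_base h]
      simp [(digitChar_sub m h).1]
    · have hq : 0 < m / 10 := by omega
      have hr : m % 10 < 10 := by omega
      have hsplit : 10 * (m / 10) + m % 10 = m := by omega
      have happ := Nat.toDigits_append_toDigits (b := 10) (n := m / 10) (d := m % 10)
        (by omega) hq hr
      rw [hsplit] at happ
      rw [← happ, List.foldl_append, ih (m/10) (by omega)]
      rw [Nat.toDigits_of_lt_base hr]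
      simp [(digitChar_sub _ hr).1]
      omega

theorem foldl_int_nat (cs : List Char) (h : ∀ c ∈ cs, 48 ≤ c.toNat) :
    ∀ a : Nat, cs.foldl (fun x c => x * 10 + ((c.toNat : Int) - 48)) (a : Int)
      = ((cs.foldl (fun n c => n * 10 + (c.toNat - 48)) a : Nat) : Int) := by
  induction cs with
  | nil => intro a; simp
  | cons c t iht =>
    intro a
    have hc : 48 ≤ c.toNat := h c (by simp)
    have hstep : (a : Int) * 10 + ((c.toNat : Int) - 48) = ((a * 10 + (c.toNat - 48) : Nat) : Int) := by
      push_cast; omega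
    simp only [List.foldl_cons, hstep]
    exact iht (fun c hc => h c (by simp [hc])) _

theorem pyIntDigits_toStr (n : Int) (hn : 1 ≤ n) : pyIntDigits (PySem.Int.toStr n) = n := by
  have hchars : PySem.Int.toChars n = Nat.toDigits 10 n.toNat := by
    simp [PySem.Int.toChars, show ¬ n < 0 by omega]
  have hd : ∀ c ∈ Nat.toDigits 10 n.toNat, 48 ≤ c.toNat := by
    intro c hc
    have := Nat.isDigit_of_mem_toDigits (b := 10) (by omega) (by omega) hc
    simp [Char.isDigit, UInt32.le_iff_toNat_le] at this
    omega
  unfold pyIntDigits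
  rw [PySem.Int.toList_toStr, hchars]
  have := foldl_int_nat _ hd 0
  simpa [valNat_toDigits] using this.trans (by rw [valNat_toDigits]; omega)

theorem toList_fmtA (k : Char) (v : Int) :
    (fmtA k v).toList = k :: ' ' :: PySem.Int.toChars v := by
  simp [fmtA, String.toList_append, PySem.Int.toList_toStr]

theorem strKey_fmtA (k : Char) (v : Int) (hv : 1 ≤ v) : strKey (fmtA k v) = pairKey (k, v) := by
  unfold strKey pairKey
  have h1 : PySem.Str.pyGet? (fmtA k v) 0 = some k := by
    rw [PySem.Str.pyGet?_eq, PySem.Chars.pyGet?_eq_listPyGet?, toList_fmtA]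
    exact PySem.List.pyGet?_zero_cons _ _
  have h2 : pyIntDigits (PySem.Str.slice (fmtA k v) (some 2) none) = v := by
    have hlist : (PySem.Str.slice (fmtA k v) (some 2) none).toList = PySem.Int.toChars v := by
      rw [PySem.Str.toList_slice, toList_fmtA]
      show PySem.List.slice _ _ _ = _
      rw [PySem.List.slice_from _ (by norm_num : (0:Int) ≤ 2)]
      rfl
    have hts : PySem.Str.slice (fmtA k v) (some 2) none = PySem.Int.toStr v := by
      apply String.toList_injective ?_
      rw [hlist, PySem.Int.toList_toStr]
    rw [hts]; exact pyIntDigits_toStr v hv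
  rw [h1, h2]
  rfl

theorem count_go (c : Char) : ∀ (fuel : Nat) (l : List Char) (acc : Nat), l.length ≤ fuel →
    PySem.Chars.count.go [c] fuel l acc = acc + l.count c := by
  intro fuel
  induction fuel with
  | zero => intro l acc h; simp at h; simp [h, PySem.Chars.count.go]
  | succ n ih =>
    intro l acc h
    cases l with
    | nil => simp [PySem.Chars.count.go]
    | cons x t =>
      rw [PySem.Chars.count.go]
      by_cases hx : c = x
      · subst hx
        simp [List.isPrefixOf, ih t (acc+1) (by simpa using h), List.count_cons]
        omega
      · have hp : [c].isPrefixOf (x :: t) = false := by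
          simp only [List.isPrefixOf, Bool.and_eq_false_iff]
          left
          simpa using hx
        simp [hp, ih t acc (by simpa using h), List.count_cons, Ne.symm hx]

theorem count_singleton (s : List Char) (c : Char) :
    PySem.Chars.count s [c] = s.count c := by
  rw [PySem.Chars.count]
  simp [count_go c s.length s 0 le_rfl]

theorem mem_abc (x : Char) : x ∈ abc ↔ ('A' ≤ x ∧ x ≤ 'Z') := by
  constructor
  · intro h; fin_cases h <;> decide
  · rintro ⟨h1, h2⟩
    have hl : 65 ≤ x.toNat := by
      simpa [Char.le_def, UInt32.le_iff_toNat_le] using h1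
    have hr : x.toNat ≤ 90 := by
      simpa [Char.le_def, UInt32.le_iff_toNat_le] using h2
    rw [← Char.ofNat_toNat x]
    interval_cases x.toNat <;> decide

theorem sorted2_eq_sorted_lex {α κ₁ κ₂ : Type} [LinearOrder κ₁] [LinearOrder κ₂]
    (xs : List α) (k1 : α → κ₁) (k2 : α → κ₂) :
    PySem.List.sorted2 xs k1 k2 = PySem.List.sorted xs (fun x => toLex (k1 x, k2 x)) := by
  have hcomp : (fun a b => decide (k1 a < k1 b) || (!decide (k1 b < k1 a) && decide (k2 a < k2 b)))
      = (fun a b : α => decide ((toLex (k1 a, k2 a)) < (toLex (k1 b, k2 b)))) := by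
    funext a b
    rcases lt_trichotomy (k1 a) (k1 b) with h | h | h
    · simp [h, Prod.Lex.lt_iff, not_lt.mpr h.le]
    · simp [h, Prod.Lex.lt_iff]
    · simp [not_lt.mpr h.le, not_lt_of_gt h, Prod.Lex.lt_iff, h.ne']
      intro h2
      exact absurd h2 (not_le.mpr h)
  simp only [PySem.List.sorted2, PySem.List.sorted, if_neg (by decide : ¬ (false = true))]
  rw [hcomp]

theorem lettersB_perm (text : String) : (PySem.Set.ofList (upsOf text)).Perm (lettersB text) := by
  unfold upsOf lettersB
  rw [List.perm_ext_iff_of_nodup (PySem.Set.nodup_ofList _) ((by decide : abc.Nodup).filter _)]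
  intro x
  rw [PySem.Set.mem_ofList]
  simp only [List.mem_filter, decide_eq_true_eq, mem_abc, cntOf]
  constructor
  · rintro ⟨hmem, hup⟩
    exact ⟨hup, by exact_mod_cast Int.natCast_pos.mpr (List.count_pos_iff.mpr hmem)⟩
  · rintro ⟨hup, hcnt⟩
    refine ⟨List.count_pos_iff.mp ?_, hup⟩
    omega

theorem solve_eq (text : String) :
    solve text = PySem.Str.join "\n"
      (PySem.List.sorted ((PySem.Set.ofList (upsOf text)).map (fun k => fmtA k (cntOf text k))) strKey) := by
  unfold solve
  simp only []
  rw [PySem.List.foldl_ite_eq_foldl_filter, PySem.Dict.foldl_insert_getD_add_one_eq_counter,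
    PySem.Dict.items_counter]
  rw [sorted2_eq_sorted_lex]
  have hkey : (fun x => toLex (-(pyIntDigits (PySem.Str.slice x (some 2) none)),
      (PySem.Str.pyGet? x 0).getD ' ')) = strKey := rfl
  rw [hkey, List.map_map]
  congr 2
  apply List.map_congr_left
  intro k hk
  have hk' : k ∈ upsOf text := (PySem.Set.mem_ofList _ _).mp hk
  have hup : ('A' ≤ k ∧ k ≤ 'Z') := by
    have := (List.mem_filter.mp hk').2
    simpa using this
  simp only [Function.comp_def]
  rw [List.count_filter (by simpa using hup)]
  rfl

theorem solve_alt_eq (text : String) :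
    solve_alt text = PySem.Str.join "\n"
      ((PySem.List.sorted ((lettersB text).map (fun c => (c, cntOf text c))) pairKey).map fmtB) := by
  unfold solve_alt
  simp only []
  rw [show PySem.List.pyRange 65 91 1
      = [65, 66, 67, 68, 69, 70, 71, 72, 73, 74, 75, 76, 77, 78, 79, 80,
         81, 82, 83, 84, 85, 86, 87, 88, 89, 90] from by decide]
  rw [PySem.List.foldl_append_ite
    (p := fun x : Int => 0 < (PySem.Str.count text (String.ofList [Char.ofNat x.toNat]) : Int))
    (f := fun x : Int => (Char.ofNat x.toNat, (PySem.Str.count text (String.ofList [Char.ofNat x.toNat]) : Int)))]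
  have hcnt : ∀ c : Char, (PySem.Str.count text (String.ofList [c]) : Int) = cntOf text c := by
    intro c
    rw [PySem.Str.count_eq]
    have : (String.ofList [c]).toList = [c] := by simp
    rw [this, count_singleton]
    rfl
  simp only [hcnt]
  have habc : ([65, 66, 67, 68, 69, 70, 71, 72, 73, 74, 75, 76, 77, 78, 79, 80,
      81, 82, 83, 84, 85, 86, 87, 88, 89, 90] : List Int).map (fun x => Char.ofNat x.toNat) = abc := by
    decide
  have hpairs : (([65, 66, 67, 68, 69, 70, 71, 72, 73, 74, 75, 76, 77, 78, 79, 80,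
      81, 82, 83, 84, 85, 86, 87, 88, 89, 90] : List Int).filter
        (fun x => decide (0 < cntOf text (Char.ofNat x.toNat)))).map
        (fun x : Int => (Char.ofNat x.toNat, cntOf text (Char.ofNat x.toNat)))
      = (lettersB text).map (fun c => (c, cntOf text c)) := by
    unfold lettersB
    rw [← habc, List.filter_map, List.map_map]
    rfl
  rw [List.nil_append, hpairs, sorted2_eq_sorted_lex]
  rfl

theorem main_eq (text : String) : solve text = solve_alt text := by
  rw [solve_eq, solve_alt_eq]
  set g : Char → Char × Int := fun c => (c, cntOf text c) with hg
  set pairsB := (lettersB text).map g with hpairsB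
  set sortedPairs := PySem.List.sorted pairsB pairKey with hsorted
  congr 1
  apply PySem.List.sorted_eq_of_perm_of_pairwise_lt
  · -- permutation
    refine ((PySem.List.sorted_perm pairsB pairKey false).map fmtB).trans ?_
    rw [hpairsB, List.map_map]
    have h1 : (lettersB text).map (fmtB ∘ g) = (lettersB text).map (fun k => fmtA k (cntOf text k)) := rfl
    rw [h1]
    exact ((lettersB_perm text).map _).symm
  · -- pairwise strict
    have hmem1 : ∀ p ∈ sortedPairs, 1 ≤ p.2 := by
      intro p hp
      have : p ∈ pairsB := (PySem.List.mem_sorted _ _ _ _).mp hp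
      rw [hpairsB] at this
      obtain ⟨c, hc, rfl⟩ := List.mem_map.mp this
      have := (List.mem_filter.mp hc).2
      simp only [decide_eq_true_eq] at this
      simp only [hg]
      omega
    have hfstnodup : (sortedPairs.map Prod.fst).Nodup := by
      have hperm := (PySem.List.sorted_perm pairsB pairKey false).map Prod.fst
      rw [hsorted]
      rw [hperm.nodup_iff]
      rw [hpairsB, List.map_map]
      have : (lettersB text).map (Prod.fst ∘ g) = lettersB text := by
        simp [hg, Function.comp_def]
      rw [this]
      exact ((by decide : abc.Nodup).filter _)
    have hne : sortedPairs.Pairwise (fun p q => p.1 ≠ q.1) :=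
      List.pairwise_map.mp hfstnodup
    have hle : sortedPairs.Pairwise (fun p q => pairKey p ≤ pairKey q) :=
      PySem.List.sorted_pairwise pairsB pairKey
    have hlt : sortedPairs.Pairwise (fun p q => pairKey p < pairKey q) := by
      refine (hle.and hne).imp ?_
      rintro p q ⟨h1, h2⟩
      refine lt_of_le_of_ne h1 (fun heq => h2 ?_)
      have : ((-p.2, p.1) : Int × Char) = (-q.2, q.1) := by
        simpa [pairKey] using heq
      exact (Prod.mk.injEq _ _ _ _ ▸ this).2
    rw [List.pairwise_map]
    refine hlt.imp_of_mem ?_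
    intro p q hp hq hpq
    have h1 : strKey (fmtB p) = pairKey p := by
      have := strKey_fmtA p.1 p.2 (hmem1 p hp)
      simpa [fmtB, fmtA] using this
    have h2 : strKey (fmtB q) = pairKey q := by
      have := strKey_fmtA q.1 q.2 (hmem1 q hq)
      simpa [fmtB, fmtA] using this
    rw [h1, h2]
    exact hpq

-- ===== VERDICT (by name: the statement is the Claim_ definition above) =====
theorem solve_spec : Claim_equal_solve := by
  intro text _
  unfold Spec_solve
  exact main_eq text
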